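-- pv_equiv track=rewrite | github.com/matluca/AdventOfCode | 2023/22/sol.py | get_under
-- ===== SOURCE A (Python) =====
-- def get_points(cube):
--     a, b = cube
--     points = []
--     for x in range(a[0], b[0] + 1):
--         for y in range(a[1], b[1] + 1):
--             for z in range(a[2], b[2] + 1):
--                 points.append((x, y, z))
--     return points
--
-- def get_under(cubes):
--     under = {}
--     for i, cube in cubes.items():
--         under[i] = []
--         for p in get_points(cube):
--             for j, other in cubes.items():
--                 for q in get_points(other):
--                     if (p[0], p[1]) == (q[0], q[1]) and q[2] == p[2] - 1:
--                         if i != j and j not in under[i]: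
--                             under[i].append(j)
--     return under
-- ===== SOURCE B (Python) =====
-- def _points(cube):
--     a, b = cube
--     if a[0] > b[0] or a[1] > b[1] or a[2] > b[2]:
--         return []  # empty box: no points
--     return [(x, y, z)
--             for x in range(a[0], b[0] + 1)
--             for y in range(a[1], b[1] + 1)
--             for z in range(a[2], b[2] + 1)]
--
-- def get_under(cubes):
--     # index every occupied point -> ids of the cubes covering it (in dict order)
--     index = {}
--     for j, cube in cubes.items():
--         for q in _points(cube):
--             index.setdefault(q, []).append(j)
--     under = {}
--     for i, cube in cubes.items():
--         supp = []
--         for p in _points(cube):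
--             for j in index.get((p[0], p[1], p[2] - 1), ()):
--                 if i != j and j not in supp:
--                     supp.append(j)
--         under[i] = supp
--     return under
-- ===== Notes on version B (the rewrite author's own statement) =====
-- stated objective: faster
-- what changed: B builds a point->cube-ids index once and looks up the single point below each cube point, replacing A's scan of all cubes and all their points for every point of every cube.
import Mathlib
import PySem

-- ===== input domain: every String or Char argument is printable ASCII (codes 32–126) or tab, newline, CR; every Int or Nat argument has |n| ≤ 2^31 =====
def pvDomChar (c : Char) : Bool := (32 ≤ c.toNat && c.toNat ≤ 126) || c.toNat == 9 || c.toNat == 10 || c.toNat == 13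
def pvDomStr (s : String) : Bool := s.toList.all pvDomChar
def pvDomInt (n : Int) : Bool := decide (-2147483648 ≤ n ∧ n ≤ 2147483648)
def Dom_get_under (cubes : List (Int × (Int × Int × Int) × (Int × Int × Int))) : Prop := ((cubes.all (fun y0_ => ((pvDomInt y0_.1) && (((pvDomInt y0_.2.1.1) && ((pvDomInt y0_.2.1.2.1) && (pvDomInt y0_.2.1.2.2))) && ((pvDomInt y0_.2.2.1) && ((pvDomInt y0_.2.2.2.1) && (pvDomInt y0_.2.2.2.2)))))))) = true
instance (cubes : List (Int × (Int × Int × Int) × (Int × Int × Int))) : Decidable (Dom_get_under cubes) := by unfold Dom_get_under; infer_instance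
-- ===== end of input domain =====

-- B replaces A's all-cubes/all-points inner scan by a point→cube-ids index built once,
-- looking up only the single point below each cube point (objective: faster).
-- The list argument stands for the Python dict (both ports read it through PySem.Dict.ofList).

-- ===== PORT A =====
-- port of get_points: nested range loops appending (x, y, z)
def pvGetPoints (cube : (Int × Int × Int) × (Int × Int × Int)) : List (Int × Int × Int) :=
  (PySem.List.pyRange cube.1.1 (cube.2.1 + 1) 1).foldl (fun pts x =>
    (PySem.List.pyRange cube.1.2.1 (cube.2.2.1 + 1) 1).foldl (fun pts y =>
      (PySem.List.pyRange cube.1.2.2 (cube.2.2.2 + 1) 1).foldl (fun pts z =>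
        pts ++ [(x, y, z)]) pts) pts) []

def get_under (cubes : List (Int × (Int × Int × Int) × (Int × Int × Int))) : List (Int × List Int) :=
  let d := PySem.Dict.ofList cubes
  (d.items.foldl (fun under ic =>
      let under := under.insert ic.1 ([] : List Int)
      (pvGetPoints ic.2).foldl (fun under p =>
        d.items.foldl (fun under jc =>
          (pvGetPoints jc.2).foldl (fun under q =>
            if (p.1, p.2.1) = (q.1, q.2.1) ∧ q.2.2 = p.2.2 - 1 then
              if ic.1 ≠ jc.1 ∧ ¬ (jc.1 ∈ under.getD ic.1 []) then
                under.modify ic.1 [] (· ++ [jc.1])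
              else under
            else under) under) under) under)
    (PySem.Dict.empty : PySem.Dict Int (List Int))).items

-- ===== PORT B =====
-- port of _points: the triple comprehension
def pvPointsB (cube : (Int × Int × Int) × (Int × Int × Int)) : List (Int × Int × Int) :=
  if cube.1.1 > cube.2.1 ∨ cube.1.2.1 > cube.2.2.1 ∨ cube.1.2.2 > cube.2.2.2 then []
  else
  (PySem.List.pyRange cube.1.1 (cube.2.1 + 1) 1).flatMap (fun x =>
    (PySem.List.pyRange cube.1.2.1 (cube.2.2.1 + 1) 1).flatMap (fun y =>
      (PySem.List.pyRange cube.1.2.2 (cube.2.2.2 + 1) 1).map (fun z => (x, y, z))))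

def get_under_alt (cubes : List (Int × (Int × Int × Int) × (Int × Int × Int))) : List (Int × List Int) :=
  let d := PySem.Dict.ofList cubes
  -- index.setdefault(q, []).append(j)
  let index := d.items.foldl (fun idx jc =>
      (pvPointsB jc.2).foldl (fun idx q => idx.modify q ([] : List Int) (· ++ [jc.1])) idx)
    (PySem.Dict.empty : PySem.Dict (Int × Int × Int) (List Int))
  (d.items.foldl (fun under ic =>
      let supp := (pvPointsB ic.2).foldl (fun supp p =>
        (index.getD (p.1, p.2.1, p.2.2 - 1) []).foldl (fun supp j =>
          if ic.1 ≠ j ∧ ¬ (j ∈ supp) then supp ++ [j] else supp) supp) []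
      under.insert ic.1 supp)
    (PySem.Dict.empty : PySem.Dict Int (List Int))).items

-- ===== PRECONDITION & SPEC =====
def Spec_get_under (cubes : List (Int × (Int × Int × Int) × (Int × Int × Int))) (out : List (Int × List Int)) : Prop := out = get_under_alt cubes
instance (cubes : List (Int × (Int × Int × Int) × (Int × Int × Int))) (out : List (Int × List Int)) : Decidable (Spec_get_under cubes out) := by unfold Spec_get_under; infer_instance

-- ===== CLAIM (what is proved, stated in full; the proofs are below) =====
def Claim_equal_get_under : Prop := ∀ (cubes : List (Int × (Int × Int × Int) × (Int × Int × Int))), Dom_get_under cubes → Spec_get_under cubes (get_under cubes)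

-- ===== LEMMAS AND PROOFS =====

-- the pure (dict-free) value A accumulates for key i with cube c, scanning the items list l
def pvQStep (i j : Int) (p : Int × Int × Int) (acc : List Int) (q : Int × Int × Int) : List Int :=
  if (p.1, p.2.1) = (q.1, q.2.1) ∧ q.2.2 = p.2.2 - 1 then
    if i ≠ j ∧ ¬ (j ∈ acc) then acc ++ [j] else acc
  else acc

def pvPureA (l : List (Int × (Int × Int × Int) × (Int × Int × Int))) (i : Int)
    (c : (Int × Int × Int) × (Int × Int × Int)) : List Int :=
  (pvGetPoints c).foldl (fun acc p =>
    l.foldl (fun acc jc => (pvGetPoints jc.2).foldl (pvQStep i jc.1 p) acc) acc) []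

-- B's index and per-cube list as standalone functions of the items list
def pvIndex (l : List (Int × (Int × Int × Int) × (Int × Int × Int))) :
    PySem.Dict (Int × Int × Int) (List Int) :=
  l.foldl (fun idx jc =>
      (pvPointsB jc.2).foldl (fun idx q => idx.modify q ([] : List Int) (· ++ [jc.1])) idx)
    PySem.Dict.empty

def pvPureB (l : List (Int × (Int × Int × Int) × (Int × Int × Int))) (i : Int)
    (c : (Int × Int × Int) × (Int × Int × Int)) : List Int :=
  (pvPointsB c).foldl (fun supp p =>
    ((pvIndex l).getD (p.1, p.2.1, p.2.2 - 1) []).foldl (fun supp j =>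
      if i ≠ j ∧ ¬ (j ∈ supp) then supp ++ [j] else supp) supp) []

-- the two point enumerations agree
theorem pvPoints_eq (c : (Int × Int × Int) × (Int × Int × Int)) : pvGetPoints c = pvPointsB c := by
  unfold pvGetPoints pvPointsB
  split_ifs with h
  · have e : ∀ (a b : Int), b < a → PySem.List.pyRange a (b + 1) 1 = [] := by
      intro a b hab
      rw [PySem.List.pyRange_one]
      have hz : (b + 1 - a).toNat = 0 := Int.toNat_eq_zero.mpr (by omega)
      simp [hz]
    rcases h with h | h | h
    · simp [e c.1.1 c.2.1 h]
    · simp [e c.1.2.1 c.2.2.1 h]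
    · simp [e c.1.2.2 c.2.2.2 h]
  · simp [← List.flatMap_def, ← List.map_eq_flatMap]

-- a fold that only touches key i over a dict (d.insert i acc) is an insert of the pure fold
theorem pv_fold_fix {α κ ν : Type} [BEq κ] [LawfulBEq κ] (d : PySem.Dict κ ν) (i : κ) (l : List α)
    (F : PySem.Dict κ ν → α → PySem.Dict κ ν) (f : ν → α → ν)
    (h : ∀ acc x, F (d.insert i acc) x = d.insert i (f acc x)) :
    ∀ acc, l.foldl F (d.insert i acc) = d.insert i (l.foldl f acc) := by
  induction l with
  | nil => intro acc; rfl
  | cons x t ih => intro acc; simp only [List.foldl_cons, h, ih]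

theorem pv_modify_insert {κ : Type} [BEq κ] [LawfulBEq κ] (d : PySem.Dict κ (List Int)) (i : κ)
    (acc : List Int) (f : List Int → List Int) :
    (d.insert i acc).modify i [] f = d.insert i (f acc) := by
  simp [PySem.Dict.modify, PySem.Dict.insert_insert_self, PySem.Dict.getD_insert_self]

-- A's per-cube body equals inserting the pure list
theorem pv_bodyA (l : List (Int × (Int × Int × Int) × (Int × Int × Int)))
    (d : PySem.Dict Int (List Int)) (ic : Int × (Int × Int × Int) × (Int × Int × Int)) :
    (pvGetPoints ic.2).foldl (fun under p =>
        l.foldl (fun under jc =>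
          (pvGetPoints jc.2).foldl (fun under q =>
            if (p.1, p.2.1) = (q.1, q.2.1) ∧ q.2.2 = p.2.2 - 1 then
              if ic.1 ≠ jc.1 ∧ ¬ (jc.1 ∈ under.getD ic.1 []) then
                under.modify ic.1 [] (· ++ [jc.1])
              else under
            else under) under) under) (d.insert ic.1 []) =
      d.insert ic.1 (pvPureA l ic.1 ic.2) := by
  unfold pvPureA
  refine pv_fold_fix d ic.1 (pvGetPoints ic.2) _ _ (fun acc p => ?_) []
  refine pv_fold_fix d ic.1 l _ _ (fun acc jc => ?_) acc
  refine pv_fold_fix d ic.1 (pvGetPoints jc.2) _ _ (fun acc q => ?_) acc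
  unfold pvQStep
  split_ifs with h1 h2 h3 <;>
    simp_all [PySem.Dict.getD_insert_self, pv_modify_insert]

-- characterisation of B's index: ids of the cubes whose points contain t, with multiplicity
theorem pv_index_getD (l : List (Int × (Int × Int × Int) × (Int × Int × Int)))
    (t : Int × Int × Int) :
    (pvIndex l).getD t [] =
      l.flatMap (fun jc => ((pvPointsB jc.2).filter (fun q => q == t)).map (fun _ => jc.1)) := by
  unfold pvIndex
  suffices h : ∀ (d : PySem.Dict (Int × Int × Int) (List Int)),
      (l.foldl (fun idx jc =>
        (pvPointsB jc.2).foldl (fun idx q => idx.modify q ([] : List Int) (· ++ [jc.1])) idx) d).getD t []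
      = d.getD t [] ++ l.flatMap (fun jc => ((pvPointsB jc.2).filter (fun q => q == t)).map (fun _ => jc.1)) by
    simpa [PySem.Dict.getD_empty] using h PySem.Dict.empty
  induction l with
  | nil => intro d; simp
  | cons jc tl ih =>
    intro d
    simp only [List.foldl_cons, ih, List.flatMap_cons, ← List.append_assoc]
    congr 1
    have hmap : (pvPointsB jc.2).foldl (fun idx q => idx.modify q ([] : List Int) (· ++ [jc.1])) d
        = ((pvPointsB jc.2).map (fun q => (q, jc.1))).foldl (fun idx p => idx.modify p.1 [] (· ++ [p.2])) d := by
      rw [List.foldl_map]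
    rw [hmap, PySem.Dict.getD_foldl_modify_append]
    simp [List.filter_map, Function.comp_def, List.map_const']

-- no further append once j is already in the accumulator (A's inner loop)
theorem pv_noapp_A (i j : Int) (p : Int × Int × Int) (qs : List (Int × Int × Int))
    (acc : List Int) (hj : j ∈ acc) : qs.foldl (pvQStep i j p) acc = acc := by
  induction qs generalizing acc with
  | nil => rfl
  | cons q t ih =>
    have : pvQStep i j p acc q = acc := by unfold pvQStep; split_ifs <;> simp_all
    simp [this, ih acc hj]

-- A's scan of a cube's points appends j once iff the point below p is among them
theorem pv_lemA (i j : Int) (p : Int × Int × Int) (qs : List (Int × Int × Int)) (acc : List Int) :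
    qs.foldl (pvQStep i j p) acc =
      if (p.1, p.2.1, p.2.2 - 1) ∈ qs ∧ i ≠ j ∧ ¬ (j ∈ acc) then acc ++ [j] else acc := by
  induction qs generalizing acc with
  | nil => simp
  | cons q t ih =>
    have hcond : ((p.1, p.2.1) = (q.1, q.2.1) ∧ q.2.2 = p.2.2 - 1) ↔ q = (p.1, p.2.1, p.2.2 - 1) := by
      obtain ⟨q1, q2, q3⟩ := q
      simp [Prod.ext_iff]
      tauto
    simp only [List.foldl_cons]
    by_cases hq : q = (p.1, p.2.1, p.2.2 - 1)
    · have hstep : pvQStep i j p acc q =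
          if i ≠ j ∧ ¬ (j ∈ acc) then acc ++ [j] else acc := by
        unfold pvQStep; rw [if_pos (hcond.mpr hq)]
      rw [hstep]
      by_cases hg : i ≠ j ∧ ¬ (j ∈ acc)
      · rw [if_pos hg, pv_noapp_A i j p t _ (by simp), if_pos ⟨by simp [hq], hg⟩]
      · rw [if_neg hg, ih]
        by_cases hm : (p.1, p.2.1, p.2.2 - 1) ∈ t <;> simp [hm, hg]
    · have hstep : pvQStep i j p acc q = acc := by
        unfold pvQStep; rw [if_neg (by rw [hcond]; exact hq)]
      rw [hstep, ih]
      have hne : (p.1, p.2.1, p.2.2 - 1) ≠ q := fun h => hq h.symm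
      simp [List.mem_cons, hne]
-- B's dedup-append over a constant-j list appends j once iff the list is nonempty
theorem pv_noapp_B (i j : Int) (s : List (Int × Int × Int)) (acc : List Int) (hj : j ∈ acc) :
    (s.map (fun _ => j)).foldl (fun supp j' => if i ≠ j' ∧ ¬ (j' ∈ supp) then supp ++ [j'] else supp) acc = acc := by
  induction s generalizing acc with
  | nil => rfl
  | cons q t ih =>
    simp only [List.map_cons, List.foldl_cons]
    rw [if_neg (by simp [hj])]
    exact ih acc hj

theorem pv_lemB (i j : Int) (s : List (Int × Int × Int)) (acc : List Int) :
    (s.map (fun _ => j)).foldl (fun supp j' => if i ≠ j' ∧ ¬ (j' ∈ supp) then supp ++ [j'] else supp) acc =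
      if s ≠ [] ∧ i ≠ j ∧ ¬ (j ∈ acc) then acc ++ [j] else acc := by
  induction s generalizing acc with
  | nil => simp
  | cons q t ih =>
    simp only [List.map_cons, List.foldl_cons]
    by_cases hg : i ≠ j ∧ ¬ (j ∈ acc)
    · rw [if_pos hg, pv_noapp_B i j t _ (by simp), if_pos ⟨by simp, hg⟩]
    · rw [if_neg hg, ih]
      by_cases ht : t = [] <;> simp [ht, hg]

-- the two pure per-cube lists coincide
theorem pv_pure_eq (l : List (Int × (Int × Int × Int) × (Int × Int × Int))) (i : Int)
    (c : (Int × Int × Int) × (Int × Int × Int)) : pvPureA l i c = pvPureB l i c := by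
  unfold pvPureA pvPureB
  rw [pvPoints_eq c]
  congr 1
  funext acc p
  rw [pv_index_getD, List.foldl_flatMap]
  congr 1
  funext acc jc
  rw [pv_lemA, pv_lemB]
  have hne : ((pvPointsB jc.2).filter (fun q => q == (p.1, p.2.1, p.2.2 - 1))) ≠ [] ↔
      (p.1, p.2.1, p.2.2 - 1) ∈ pvGetPoints jc.2 := by
    rw [pvPoints_eq, Ne, List.filter_eq_nil_iff]
    simp
  by_cases hm : (p.1, p.2.1, p.2.2 - 1) ∈ pvGetPoints jc.2 <;>
    simp [hm, hne.not.mpr, hne]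
-- the two whole-dict loops, as functions of the items list
def pvLoopA (l : List (Int × (Int × Int × Int) × (Int × Int × Int))) : PySem.Dict Int (List Int) :=
  l.foldl (fun under ic =>
      (pvGetPoints ic.2).foldl (fun under p =>
        l.foldl (fun under jc =>
          (pvGetPoints jc.2).foldl (fun under q =>
            if (p.1, p.2.1) = (q.1, q.2.1) ∧ q.2.2 = p.2.2 - 1 then
              if ic.1 ≠ jc.1 ∧ ¬ (jc.1 ∈ under.getD ic.1 []) then
                under.modify ic.1 [] (· ++ [jc.1])
              else under
            else under) under) under) (under.insert ic.1 []))
    PySem.Dict.empty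

def pvLoopB (l : List (Int × (Int × Int × Int) × (Int × Int × Int))) : PySem.Dict Int (List Int) :=
  l.foldl (fun under ic => under.insert ic.1 (pvPureB l ic.1 ic.2)) PySem.Dict.empty

theorem pvLoop_eq (l : List (Int × (Int × Int × Int) × (Int × Int × Int))) :
    pvLoopA l = pvLoopB l := by
  unfold pvLoopA pvLoopB
  congr 1
  funext under ic
  rw [pv_bodyA l under ic, pv_pure_eq]

-- ===== VERDICT (by name: the statement is the Claim_ definition above) =====
theorem get_under_spec : Claim_equal_get_under := by
  intro cubes _
  unfold Spec_get_under
  show (pvLoopA (PySem.Dict.ofList cubes).items).items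
      = (pvLoopB (PySem.Dict.ofList cubes).items).items
  rw [pvLoop_eq]
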